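-- pv_equiv track=rewrite | github.com/stevenblum/vrp_gnn | CVRPLibGraphPlotCallback.py | _split_model_routes
-- ===== SOURCE A (Python) =====
-- def _split_model_routes(action_seq):
--     """
--     action_seq: 1D tensor/list with depot=0 repeated to separate routes.
--     Returns list of routes, each like [0, ..., 0].
--     """
--     seq = action_seq.tolist() if hasattr(action_seq, "tolist") else list(action_seq)
--
--     routes = []
--     cur = []
--     for n in seq:
--         if n == 0:
--             if cur:
--                 routes.append([0] + cur + [0])
--                 cur = []
--         else:
--             cur.append(n)
--     if cur:
--         routes.append([0] + cur + [0])
--     return routes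
-- ===== SOURCE B (Python) =====
-- def _split_model_routes(action_seq):
--     """
--     action_seq: 1D tensor/list with depot=0 repeated to separate routes.
--     Returns list of routes, each like [0, ..., 0].
--     """
--     seq = action_seq.tolist() if hasattr(action_seq, "tolist") else list(action_seq)
--
--     n = len(seq)
--     routes = []
--     i = 0
--     while i < n:
--         if seq[i] == 0:
--             i += 1
--         else:
--             j = i + 1
--             while j < n and seq[j] != 0:
--                 j += 1
--             routes.append([0] + seq[i:j] + [0])
--             i = j
--     return routes
-- ===== Notes on version B (the rewrite author's own statement) =====
-- stated objective: alternative
-- what changed: Replaces the element-by-element loop with a stateful cur buffer and duplicated flush-at-end logic by a two-pointer run scanner: it skips zeros, finds the end of each maximal nonzero run, and emits the route as a slice seq[i:j], with no accumulator and no final flush.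
import Mathlib
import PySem

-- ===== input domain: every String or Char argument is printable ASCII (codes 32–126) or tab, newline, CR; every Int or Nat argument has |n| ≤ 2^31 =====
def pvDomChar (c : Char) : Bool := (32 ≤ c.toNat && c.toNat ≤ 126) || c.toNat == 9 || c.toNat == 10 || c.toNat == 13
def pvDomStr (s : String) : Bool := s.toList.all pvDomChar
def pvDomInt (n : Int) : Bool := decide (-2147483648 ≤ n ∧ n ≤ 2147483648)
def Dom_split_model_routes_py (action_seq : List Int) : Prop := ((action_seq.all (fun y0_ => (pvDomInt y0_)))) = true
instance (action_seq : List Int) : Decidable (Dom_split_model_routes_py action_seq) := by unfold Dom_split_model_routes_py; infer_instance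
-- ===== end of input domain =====

-- B replaces A's element-by-element loop with a `cur` buffer and end flush by a
-- two-pointer scanner over maximal nonzero runs, emitted as slices (objective: alternative).

-- ===== PORT A =====
-- one step of A's for-loop: state = (routes, cur)
def splitStep (st : List (List Int) × List Int) (n : Int) : List (List Int) × List Int :=
  if n = 0 then
    if st.2.isEmpty then st else (st.1 ++ [[0] ++ st.2 ++ [0]], [])
  else (st.1, st.2 ++ [n])

def split_model_routes_py (action_seq : List Int) : List (List Int) :=
  let seq := action_seq
  let st := seq.foldl splitStep ([], [])
  if st.2.isEmpty then st.1 else st.1 ++ [[0] ++ st.2 ++ [0]]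

-- ===== PORT B =====
-- inner while:  j = i+1; while j < n and seq[j] != 0: j += 1
def nextZero (seq : List Int) (j : Nat) : Nat :=
  if h : j < seq.length then
    if seq[j] = 0 then j else nextZero seq (j + 1)
  else j
termination_by seq.length - j

theorem nextZero_ge (seq : List Int) (j : Nat) : j ≤ nextZero seq j := by
  rw [nextZero]
  split
  · split
    · exact le_refl _
    · exact le_trans (Nat.le_succ j) (nextZero_ge seq (j + 1))
  · exact le_refl _
termination_by seq.length - j

-- outer while loop of B, recursing on the index i
def altLoop (seq : List Int) (i : Nat) : List (List Int) :=
  if h : i < seq.length then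
    if seq[i] = 0 then altLoop seq (i + 1)
    else
      ([0] ++ PySem.List.slice seq (some (i : Int)) (some ((nextZero seq (i + 1) : Nat) : Int)) ++ [0])
        :: altLoop seq (nextZero seq (i + 1))
  else []
termination_by seq.length - i
decreasing_by
  · omega
  · have := nextZero_ge seq (i + 1); omega

def split_model_routes_py_alt (action_seq : List Int) : List (List Int) :=
  altLoop action_seq 0

-- ===== PRECONDITION & SPEC =====
def Spec_split_model_routes_py (action_seq : List Int) (out : List (List Int)) : Prop := out = split_model_routes_py_alt action_seq
instance (action_seq : List Int) (out : List (List Int)) : Decidable (Spec_split_model_routes_py action_seq out) := by unfold Spec_split_model_routes_py; infer_instance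

-- ===== CLAIM (what is proved, stated in full; the proofs are below) =====
def Claim_equal_split_model_routes_py : Prop := ∀ (action_seq : List Int), Dom_split_model_routes_py action_seq → Spec_split_model_routes_py action_seq (split_model_routes_py action_seq)

-- ===== LEMMAS AND PROOFS =====

-- direct (non-accumulator) description of A's loop
def dA : List Int → List Int → List (List Int)
  | [], c => if c.isEmpty then [] else [[0] ++ c ++ [0]]
  | n :: xs, c =>
    if n = 0 then
      if c.isEmpty then dA xs [] else ([0] ++ c ++ [0]) :: dA xs []
    else dA xs (c ++ [n])

def flushA (st : List (List Int) × List Int) : List (List Int) :=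
  if st.2.isEmpty then st.1 else st.1 ++ [[0] ++ st.2 ++ [0]]

theorem foldl_splitStep_acc (l : List Int) (r : List (List Int)) (c : List Int) :
    l.foldl splitStep (r, c) =
      (r ++ (l.foldl splitStep ([], c)).1, (l.foldl splitStep ([], c)).2) := by
  induction l generalizing r c with
  | nil => simp
  | cons x xs ih =>
    simp only [List.foldl_cons, splitStep]
    by_cases hx : x = 0 <;> by_cases hc : c.isEmpty
    · simp [hx, hc, ih r]
    · simp only [hx, hc, if_true, Bool.false_eq_true, if_false, List.nil_append]
      rw [ih (r ++ [[0] ++ c ++ [0]]) [], ih [[0] ++ c ++ [0]] []]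
      simp
    · simp [hx, hc, ih r]
    · simp [hx, hc, ih r]

theorem flushA_acc (l : List Int) (r : List (List Int)) (c : List Int) :
    flushA (l.foldl splitStep (r, c)) = r ++ flushA (l.foldl splitStep ([], c)) := by
  rw [foldl_splitStep_acc l r c]
  unfold flushA
  by_cases h : (l.foldl splitStep ([], c)).2.isEmpty <;> simp [h]

theorem flush_foldl_eq_dA (l : List Int) (c : List Int) :
    flushA (l.foldl splitStep ([], c)) = dA l c := by
  induction l generalizing c with
  | nil => simp [flushA, dA]
  | cons x xs ih =>
    rw [List.foldl_cons]
    by_cases hx : x = 0 <;> by_cases hc : c.isEmpty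
    · rw [show splitStep ([], c) x = ([], c) by simp [splitStep, hx, hc]]
      rw [ih c, List.isEmpty_iff.mp hc]
      simp [dA, hx]
    · rw [show splitStep ([], c) x = ([[0] ++ c ++ [0]], []) by simp [splitStep, hx, hc]]
      rw [flushA_acc xs [[0] ++ c ++ [0]] [], ih []]
      simp [dA, hx, hc]
    · rw [show splitStep ([], c) x = ([], c ++ [x]) by simp [splitStep, hx, hc]]
      rw [ih (c ++ [x])]
      simp [dA, hx, hc]
    · rw [show splitStep ([], c) x = ([], c ++ [x]) by simp [splitStep, hx, hc]]
      rw [ih (c ++ [x])]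
      simp [dA, hx, hc]

theorem split_eq_dA (seq : List Int) : split_model_routes_py seq = dA seq [] := by
  unfold split_model_routes_py
  rw [← flush_foldl_eq_dA seq []]
  rfl

-- shifting a nonzero run from the input into the cur buffer
theorem dA_shift (run : List Int) (rest : List Int) (c : List Int)
    (h : ∀ y ∈ run, y ≠ 0) : dA (run ++ rest) c = dA rest (c ++ run) := by
  induction run generalizing c with
  | nil => simp
  | cons y run' ih =>
    have hy : y ≠ 0 := h y (List.mem_cons_self)
    simp only [List.cons_append, dA, hy, if_false]
    rw [ih (c ++ [y]) (fun z hz => h z (List.mem_cons_of_mem _ hz))]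
    simp

-- at the first index stopped at by nextZero, the element (if any) is 0
theorem nextZero_zero (seq : List Int) (j : Nat) (h : nextZero seq j < seq.length) :
    seq[nextZero seq j]? = some 0 := by
  by_cases hj : j < seq.length
  · by_cases hz : seq[j] = 0
    · rw [nextZero, dif_pos hj, if_pos hz, List.getElem?_eq_getElem hj, hz]
    · rw [nextZero, dif_pos hj, if_neg hz] at h ⊢
      exact nextZero_zero seq (j + 1) h
  · rw [nextZero, dif_neg hj] at h
    omega
termination_by seq.length - j

-- the run scanned over by nextZero is nonzero
theorem nextZero_run_nonzero (seq : List Int) (j : Nat) :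
    ∀ y ∈ (seq.drop j).take (nextZero seq j - j), y ≠ 0 := by
  intro y hy
  by_cases hj : j < seq.length
  · by_cases hz : seq[j] = 0
    · rw [nextZero, dif_pos hj, if_pos hz] at hy
      simp at hy
    · rw [nextZero, dif_pos hj, if_neg hz] at hy
      rw [List.drop_eq_getElem_cons hj] at hy
      have hge := nextZero_ge seq (j + 1)
      rcases Nat.exists_eq_add_of_le hge with ⟨k, hk⟩
      rw [hk, show j + 1 + k - j = k + 1 by omega, List.take_succ_cons,
        List.mem_cons] at hy
      rcases hy with rfl | hy
      · exact hz
      · exact nextZero_run_nonzero seq (j + 1) y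
          (by rw [hk, show j + 1 + k - (j + 1) = k by omega]; exact hy)
  · rw [nextZero, dif_neg hj] at hy
    simp at hy
termination_by seq.length - j

theorem dA_flushed (rest : List Int) (c : List Int) (hc : ¬ c.isEmpty)
    (h : rest = [] ∨ ∃ l, rest = 0 :: l) :
    dA rest c = ([0] ++ c ++ [0]) :: dA rest [] := by
  rcases h with rfl | ⟨l, rfl⟩
  · simp [dA, hc]
  · simp [dA, hc]

theorem altLoop_eq_dA (seq : List Int) (i : Nat) :
    altLoop seq i = dA (seq.drop i) [] := by
  rw [altLoop]
  split
  · rename_i h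
    split
    · rename_i hz
      rw [altLoop_eq_dA seq (i + 1)]
      rw [List.drop_eq_getElem_cons h, hz]
      simp [dA]
    · rename_i hnz
      rw [altLoop_eq_dA seq (nextZero seq (i + 1))]
      have hge := nextZero_ge seq (i + 1)
      set j := nextZero seq (i + 1) with hj
      set run := (seq.drop (i + 1)).take (j - (i + 1)) with hrdef
      -- the slice is seq[i] :: run
      have hslice : PySem.List.slice seq (some (i : Int)) (some (j : Int))
          = seq[i] :: run := by
        rw [PySem.List.slice_natCast]
        rw [List.drop_eq_getElem_cons h]
        rcases Nat.exists_eq_add_of_le hge with ⟨k, hk⟩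
        rw [hrdef, hk, show i + 1 + k - i = k + 1 by omega,
          show i + 1 + k - (i + 1) = k by omega, List.take_succ_cons]
      -- split drop (i+1) into run ++ drop j
      have hsplit : seq.drop (i + 1) = run ++ seq.drop j := by
        have hidx : i + 1 + (j - (i + 1)) = j := by omega
        conv_lhs => rw [← List.take_append_drop (j - (i + 1)) (seq.drop (i + 1))]
        rw [List.drop_drop, hidx]
      have hrun : ∀ y ∈ run, y ≠ 0 := nextZero_run_nonzero seq (i + 1)
      have hrest : seq.drop j = [] ∨ ∃ l, seq.drop j = 0 :: l := by
        by_cases hjl : j < seq.length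
        · have h0 : seq[j] = 0 := by
            have h1 := nextZero_zero seq (i + 1) hjl
            rw [List.getElem?_eq_getElem hjl] at h1
            exact Option.some.inj h1
          exact Or.inr ⟨seq.drop (j + 1), by rw [List.drop_eq_getElem_cons hjl, h0]⟩
        · exact Or.inl (List.drop_eq_nil_of_le (by omega))
      rw [List.drop_eq_getElem_cons h]
      conv_rhs => rw [hsplit]
      rw [show dA (seq[i] :: (run ++ seq.drop j)) [] = dA (run ++ seq.drop j) [seq[i]] by
            simp [dA, hnz],
          dA_shift run (seq.drop j) [seq[i]] hrun,
          dA_flushed (seq.drop j) ([seq[i]] ++ run) (by simp) hrest, hslice]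
      simp
  · rename_i h
    rw [List.drop_eq_nil_of_le (by omega)]
    simp [dA]
termination_by seq.length - i
decreasing_by
  all_goals (have hg := nextZero_ge seq (i + 1); omega)

-- ===== VERDICT (by name: the statement is the Claim_ definition above) =====
theorem split_model_routes_py_spec : Claim_equal_split_model_routes_py := by
  intro seq _
  unfold Spec_split_model_routes_py split_model_routes_py_alt
  rw [split_eq_dA, altLoop_eq_dA, List.drop_zero]
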